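-- pv_equiv track=rewrite | github.com/luciansmith/adventOfCode | Day 17 Efficient/day17_super_efficient.py | getTriangularNumbers
-- ===== SOURCE A (Python) =====
-- def getTriangularNumbers(xmax, ymin):
--     n = 0
--     triangles = [0]
--     step = 1
--     while n < xmax or step < -ymin+1:
--         n += step
--         triangles.append(n)
--         step += 1
--     #One more past the end
--     n += step
--     triangles.append(n)
--     return triangles
-- ===== SOURCE B (Python) =====
-- def getTriangularNumbers(xmax, ymin):
--     # Find the number of loop steps A would take: the smallest c >= 0
--     # with T(c) >= xmax and c >= -ymin; then emit T(0)..T(c+1) in closed form.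
--     c = 0
--     while c * (c + 1) // 2 < xmax or c < -ymin:
--         c += 1
--     return [i * (i + 1) // 2 for i in range(c + 2)]
-- ===== Notes on version B (the rewrite author's own statement) =====
-- stated objective: alternative
-- what changed: Separates finding the step count (smallest c with c*(c+1)//2 >= xmax and c >= -ymin) from value generation, emitting the list with the closed-form triangular formula i*(i+1)//2 over a range instead of A's incremental running-sum-and-append loop.
import Mathlib
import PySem

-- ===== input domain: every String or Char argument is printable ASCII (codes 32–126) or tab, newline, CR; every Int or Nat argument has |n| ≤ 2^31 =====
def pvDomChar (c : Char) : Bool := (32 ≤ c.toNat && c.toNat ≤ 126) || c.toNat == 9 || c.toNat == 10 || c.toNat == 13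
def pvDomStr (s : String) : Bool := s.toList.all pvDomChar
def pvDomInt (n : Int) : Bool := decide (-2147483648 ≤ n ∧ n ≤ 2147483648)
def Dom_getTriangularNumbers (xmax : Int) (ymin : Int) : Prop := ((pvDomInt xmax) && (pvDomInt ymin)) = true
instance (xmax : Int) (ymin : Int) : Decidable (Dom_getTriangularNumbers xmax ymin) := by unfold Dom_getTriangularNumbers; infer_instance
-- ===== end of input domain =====

-- B separates the step count (smallest c with c*(c+1)//2 >= xmax and c >= -ymin) from value
-- generation via the closed form T(i) = i*(i+1)//2, instead of A's running-sum-and-append loop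
-- (objective: alternative decomposition; same cost).

-- ===== PORT A =====
-- A's while loop over state (n, step, acc); the Nat argument is fuel that only makes the
-- recursion structural — with the fuel supplied below the 0-branch is reached only when the
-- loop condition is already false, where it returns exactly the post-loop append.
def pvLoopA (xmax ymin : Int) : Nat → Int → Int → List Int → List Int
  | 0, n, step, acc => acc ++ [n + step]
  | fuel + 1, n, step, acc =>
    if n < xmax ∨ step < -ymin + 1 then
      pvLoopA xmax ymin fuel (n + step) (step + 1) (acc ++ [n + step])
    else
      -- One more past the end
      acc ++ [n + step]

def getTriangularNumbers (xmax : Int) (ymin : Int) : List Int :=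
  pvLoopA xmax ymin (xmax.toNat + (-ymin).toNat) 0 1 [0]

-- ===== PORT B =====
-- Source B's counting loop: smallest c ≥ start with c*(c+1)//2 ≥ xmax and c ≥ -ymin
-- (same fuel guard; with the fuel supplied below the 0-branch is reached only at the answer)
def pvCount (xmax ymin : Int) : Nat → Int → Int
  | 0, c => c
  | fuel + 1, c =>
    if PySem.Int.floordiv (c * (c + 1)) 2 < xmax ∨ c < -ymin then
      pvCount xmax ymin fuel (c + 1)
    else c

def getTriangularNumbers_alt (xmax : Int) (ymin : Int) : List Int :=
  let c := pvCount xmax ymin (xmax.toNat + (-ymin).toNat) 0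
  (PySem.List.pyRange 0 (c + 2) 1).map (fun i => PySem.Int.floordiv (i * (i + 1)) 2)

-- ===== PRECONDITION & SPEC =====
def Spec_getTriangularNumbers (xmax : Int) (ymin : Int) (out : List Int) : Prop := out = getTriangularNumbers_alt xmax ymin
instance (xmax : Int) (ymin : Int) (out : List Int) : Decidable (Spec_getTriangularNumbers xmax ymin out) := by unfold Spec_getTriangularNumbers; infer_instance

-- ===== CLAIM (what is proved, stated in full; the proofs are below) =====
def Claim_equal_getTriangularNumbers : Prop := ∀ (xmax : Int) (ymin : Int), Dom_getTriangularNumbers xmax ymin → Spec_getTriangularNumbers xmax ymin (getTriangularNumbers xmax ymin)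

-- ===== LEMMAS AND PROOFS =====

-- c ≤ c*(c+1)//2 for 0 ≤ c
theorem pvTriGe (c : Int) (hc : 0 ≤ c) : c ≤ PySem.Int.floordiv (c * (c + 1)) 2 := by
  rw [PySem.Int.le_floordiv_iff_mul_le (by omega : (0:Int) < 2)]
  rcases lt_or_ge c 1 with h | h
  · have h0 : c = 0 := by omega
    simp [h0]
  · nlinarith

-- the product c*(c+1) is even, so the floor division is exact
theorem pvTriDouble (c : Int) :
    2 * PySem.Int.floordiv (c * (c + 1)) 2 = c * (c + 1) := by
  have hmod : PySem.Int.mod (c * (c + 1)) 2 = 0 := by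
    rw [PySem.Int.mod_eq_zero_iff_dvd]
    exact (Int.even_mul_succ_self c).two_dvd
  have := PySem.Int.floordiv_mul_add_mod (c * (c + 1)) 2
  omega

-- T(c+1) = T(c) + (c+1)
theorem pvTriStep (c : Int) :
    PySem.Int.floordiv ((c + 1) * (c + 1 + 1)) 2 =
      PySem.Int.floordiv (c * (c + 1)) 2 + (c + 1) := by
  have h1 := pvTriDouble c
  have h2 := pvTriDouble (c + 1)
  nlinarith

-- the two loops run in lockstep: from state c (with enough fuel), A's loop extends the
-- prefix [T 0, …, T c] to exactly the closed-form list of length (pvCount … c) + 2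
theorem pvLoopEq (xmax ymin : Int) : ∀ (fuel : Nat) (c : Int), 0 ≤ c →
    ((xmax - c).toNat + (-ymin - c).toNat) ≤ fuel →
    pvLoopA xmax ymin fuel (PySem.Int.floordiv (c * (c + 1)) 2) (c + 1)
        ((PySem.List.pyRange 0 (c + 1) 1).map (fun i => PySem.Int.floordiv (i * (i + 1)) 2)) =
      (PySem.List.pyRange 0 (pvCount xmax ymin fuel c + 2) 1).map
        (fun i => PySem.Int.floordiv (i * (i + 1)) 2) := by
  intro fuel
  induction fuel with
  | zero =>
    intro c hc hk
    have htri := pvTriGe c hc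
    rw [pvLoopA, pvCount]
    rw [show (c:Int) + 2 = (c + 1) + 1 by ring,
        PySem.List.pyRange_one_succ_right (by omega : (0:Int) ≤ c + 1)]
    simp only [List.map_append, List.map_cons, List.map_nil, pvTriStep c]
  | succ fuel ih =>
    intro c hc hk
    have htri := pvTriGe c hc
    rw [pvLoopA, pvCount]
    by_cases hcond : PySem.Int.floordiv (c * (c + 1)) 2 < xmax ∨ c < -ymin
    · rw [if_pos (by omega), if_pos hcond]
      have hrec := ih (c + 1) (by omega) (by omega)
      rw [PySem.List.pyRange_one_succ_right (by omega : (0:Int) ≤ c + 1)] at hrec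
      simp only [List.map_append, List.map_cons, List.map_nil, pvTriStep c] at hrec
      exact hrec
    · rw [if_neg (by omega), if_neg hcond]
      rw [show (c:Int) + 2 = (c + 1) + 1 by ring,
          PySem.List.pyRange_one_succ_right (by omega : (0:Int) ≤ c + 1)]
      simp only [List.map_append, List.map_cons, List.map_nil, pvTriStep c]

-- ===== VERDICT (by name: the statement is the Claim_ definition above) =====
theorem getTriangularNumbers_spec : Claim_equal_getTriangularNumbers := by
  intro xmax ymin _
  unfold Spec_getTriangularNumbers getTriangularNumbers getTriangularNumbers_alt
  have h := pvLoopEq xmax ymin (xmax.toNat + (-ymin).toNat) 0 (by omega) (by omega)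
  simpa [PySem.Int.floordiv, PySem.List.pyRange_one_singleton] using h
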